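-- pv_equiv track=rewrite | github.com/fork-archive-hub/pdfmux | design-system/lint.py | is_inside_html_body
-- ===== SOURCE A (Python) =====
-- def is_inside_html_body(lines: list[str], line_idx: int) -> bool:
--     """Check if a line is inside the HTML <body> (not inside <style> or <script>)."""
--     in_body = False
--     in_style = False
--     in_script = False
--     for i in range(line_idx):
--         if "<body" in lines[i]:
--             in_body = True
--         if "</body>" in lines[i]:
--             in_body = False
--         if "<style" in lines[i]:
--             in_style = True
--         if "</style>" in lines[i]:
--             in_style = False
--         if "<script" in lines[i]:
--             in_script = True
--         if "</script>" in lines[i]: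
--             in_script = False
--     return in_body and not in_style and not in_script
-- ===== SOURCE B (Python) =====
-- def is_inside_html_body(lines: list[str], line_idx: int) -> bool:
--     """Check if a line is inside the HTML <body> (not inside <style> or <script>)."""
--
--     def last_state(open_tag: str, close_tag: str) -> bool:
--         # Scan backward; the nearest line mentioning either tag decides the state.
--         for i in range(line_idx - 1, -1, -1):
--             line = lines[i]
--             if close_tag in line:
--                 return False
--             if open_tag in line:
--                 return True
--         return False
--
--     return (last_state("<body", "</body>")
--             and not last_state("<style", "</style>")
--             and not last_state("<script", "</script>"))
-- ===== Notes on version B (the rewrite author's own statement) =====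
-- stated objective: alternative
-- what changed: Replaces the single forward loop that accumulates three boolean flags over all lines before line_idx with three backward scans that each stop at the nearest line mentioning the relevant open/close tag (close tested first, matching A's statement order).
import Mathlib
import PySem

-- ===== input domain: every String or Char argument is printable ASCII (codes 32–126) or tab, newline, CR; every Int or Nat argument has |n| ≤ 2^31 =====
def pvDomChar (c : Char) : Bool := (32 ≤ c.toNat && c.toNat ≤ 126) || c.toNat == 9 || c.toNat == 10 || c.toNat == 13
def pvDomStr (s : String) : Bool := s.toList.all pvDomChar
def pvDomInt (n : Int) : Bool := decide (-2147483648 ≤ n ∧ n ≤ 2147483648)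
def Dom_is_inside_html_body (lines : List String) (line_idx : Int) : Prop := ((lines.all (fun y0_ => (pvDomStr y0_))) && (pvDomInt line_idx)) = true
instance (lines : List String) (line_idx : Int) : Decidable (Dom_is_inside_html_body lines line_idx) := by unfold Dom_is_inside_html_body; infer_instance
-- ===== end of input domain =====

-- B replaces A's forward accumulating loop (three flags carried across the whole prefix) by
-- three backward scans each stopping at the nearest line mentioning the relevant tag
-- (objective: alternative decomposition, same asymptotic cost).

-- ===== PORT A =====
def is_inside_html_body (lines : List String) (line_idx : Int) : Bool :=
  let s := (PySem.List.pyRange 0 line_idx 1).foldl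
    (fun (st : Bool × Bool × Bool) i =>
      let line := PySem.List.pyGetD lines i ""
      let in_body := if PySem.Str.isIn "<body" line then true else st.1
      let in_body := if PySem.Str.isIn "</body>" line then false else in_body
      let in_style := if PySem.Str.isIn "<style" line then true else st.2.1
      let in_style := if PySem.Str.isIn "</style>" line then false else in_style
      let in_script := if PySem.Str.isIn "<script" line then true else st.2.2
      let in_script := if PySem.Str.isIn "</script>" line then false else in_script
      (in_body, in_style, in_script))
    (false, false, false)
  s.1 && !s.2.1 && !s.2.2

-- ===== PORT B =====
-- the loop 'for i in range(line_idx - 1, -1, -1)' of last_state, counting remaining iterations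
def lastState (lines : List String) (open_tag close_tag : String) : Nat → Bool
  | 0 => false
  | n + 1 =>
    let line := PySem.List.pyGetD lines (n : Int) ""
    if PySem.Str.isIn close_tag line then false
    else if PySem.Str.isIn open_tag line then true
    else lastState lines open_tag close_tag n

def is_inside_html_body_alt (lines : List String) (line_idx : Int) : Bool :=
  let n := line_idx.toNat
  lastState lines "<body" "</body>" n
    && !(lastState lines "<style" "</style>" n)
    && !(lastState lines "<script" "</script>" n)

-- ===== PRECONDITION & SPEC =====
-- Pre_ excludes exactly line_idx > len(lines), where both Python A and Python B raise IndexError.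
def Pre_is_inside_html_body (lines : List String) (line_idx : Int) : Prop :=
  line_idx ≤ (lines.length : Int)
instance (lines : List String) (line_idx : Int) : Decidable (Pre_is_inside_html_body lines line_idx) := by unfold Pre_is_inside_html_body; infer_instance

def pvWitness_is_inside_html_body : List String × Int := (["<body>", "<style>", "</style>"], 3)

def Spec_is_inside_html_body (lines : List String) (line_idx : Int) (out : Bool) : Prop := out = is_inside_html_body_alt lines line_idx
instance (lines : List String) (line_idx : Int) (out : Bool) : Decidable (Spec_is_inside_html_body lines line_idx out) := by unfold Spec_is_inside_html_body; infer_instance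

-- ===== CLAIM (what is proved, stated in full; the proofs are below) =====
def Claim_equal_is_inside_html_body : Prop := ∀ (lines : List String) (line_idx : Int), Dom_is_inside_html_body lines line_idx → Pre_is_inside_html_body lines line_idx → Spec_is_inside_html_body lines line_idx (is_inside_html_body lines line_idx)

-- ===== LEMMAS AND PROOFS =====

-- per-category effect of one iteration of A's loop body (the close-tag test comes last, so it wins)
def stepC (op cl line : String) (b : Bool) : Bool :=
  if PySem.Str.isIn cl line then false
  else if PySem.Str.isIn op line then true
  else b

-- first line (scanning front-to-back) that mentions either tag decides; none ⇒ undetermined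
def back? (op cl : String) : List String → Option Bool
  | [] => none
  | l :: rest =>
    if PySem.Str.isIn cl l then some false
    else if PySem.Str.isIn op l then some true
    else back? op cl rest

lemma back?_append_singleton (op cl : String) (xs : List String) (x : String) :
    back? op cl (xs ++ [x]) = (back? op cl xs).or (back? op cl [x]) := by
  induction xs with
  | nil => simp [back?]
  | cons y ys ih =>
    simp only [List.cons_append, back?]
    split_ifs <;> first | rfl | (rw [ih]; congr 1; simp only [back?]; simp_all)

lemma foldl_stepC_eq_back (op cl : String) (xs : List String) (b : Bool) :
    xs.foldl (fun a l => stepC op cl l a) b = (back? op cl xs.reverse).getD b := by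
  induction xs generalizing b with
  | nil => simp [back?]
  | cons x rest ih =>
    rw [List.foldl_cons, ih, List.reverse_cons, back?_append_singleton]
    cases h : back? op cl rest.reverse with
    | some v => simp
    | none =>
      simp only [Option.none_or]
      simp only [stepC, back?]
      split_ifs <;> rfl

lemma lastState_eq_back (lines : List String) (op cl : String) (n : Nat)
    (hn : n ≤ lines.length) :
    lastState lines op cl n = (back? op cl ((lines.take n).reverse)).getD false := by
  induction n with
  | zero => simp [lastState, back?]
  | succ m ih =>
    have hm : m < lines.length := by omega
    have htake : lines.take (m + 1) = lines.take m ++ [lines[m]] :=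
      List.take_succ_eq_append_getElem hm
    have hget : PySem.List.pyGetD lines (m : Int) "" = lines[m] := by
      rw [PySem.List.pyGetD_eq_getElem _ _ (by exact_mod_cast Nat.zero_le m) (by exact_mod_cast hm)]
      simp
    rw [lastState, htake, List.reverse_append, List.reverse_singleton, List.singleton_append]
    simp only [back?, hget]
    split_ifs <;> simp [ih (by omega)]

-- one iteration of A's loop body, with the line already looked up
def tripleStep (st : Bool × Bool × Bool) (line : String) : Bool × Bool × Bool :=
  let in_body := if PySem.Str.isIn "<body" line then true else st.1
  let in_body := if PySem.Str.isIn "</body>" line then false else in_body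
  let in_style := if PySem.Str.isIn "<style" line then true else st.2.1
  let in_style := if PySem.Str.isIn "</style>" line then false else in_style
  let in_script := if PySem.Str.isIn "<script" line then true else st.2.2
  let in_script := if PySem.Str.isIn "</script>" line then false else in_script
  (in_body, in_style, in_script)

-- A's triple fold splits into three independent per-category folds
lemma triple_fold_split (xs : List String) (b s c : Bool) :
    xs.foldl tripleStep (b, s, c)
    = (xs.foldl (fun a l => stepC "<body" "</body>" l a) b,
       xs.foldl (fun a l => stepC "<style" "</style>" l a) s,
       xs.foldl (fun a l => stepC "<script" "</script>" l a) c) := by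
  induction xs generalizing b s c with
  | nil => rfl
  | cons x rest ih =>
    simp only [List.foldl_cons]
    rw [show tripleStep (b, s, c) x
        = (stepC "<body" "</body>" x b, stepC "<style" "</style>" x s,
           stepC "<script" "</script>" x c) from by
      simp only [tripleStep, stepC]]
    exact ih _ _ _

-- A's fold over range(line_idx) of lines[i] is a fold over the prefix lines[:line_idx]
lemma pyRange_fold_eq_take (lines : List String) (line_idx : Int)
    (h0 : 0 ≤ line_idx) (hle : line_idx ≤ (lines.length : Int))
    {σ : Type} (f : σ → String → σ) (init : σ) :
    (PySem.List.pyRange 0 line_idx 1).foldl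
        (fun acc i => f acc (PySem.List.pyGetD lines i "")) init
      = (lines.take line_idx.toNat).foldl f init := by
  have hlen : ((lines.take line_idx.toNat).length : Int) = line_idx := by
    simp [List.length_take]; omega
  have hcongr : (PySem.List.pyRange 0 line_idx 1).foldl
      (fun acc i => f acc (PySem.List.pyGetD lines i "")) init
      = (PySem.List.pyRange 0 line_idx 1).foldl
      (fun acc i => f acc (PySem.List.pyGetD (lines.take line_idx.toNat) i "")) init := by
    refine PySem.List.foldl_congr_mem _ _ _ _ ?_
    intro acc x hx
    rw [PySem.List.mem_pyRange_one] at hx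
    rw [PySem.List.pyGetD_eq_getElem _ _ hx.1 (by omega),
        PySem.List.pyGetD_eq_getElem _ _ hx.1 (by rw [hlen]; exact hx.2)]
    congr 1
    rw [List.getElem_take]
  rw [hcongr,
    show PySem.List.pyRange 0 line_idx 1
       = PySem.List.pyRange 0 ((lines.take line_idx.toNat).length : Int) 1 from by rw [hlen],
    PySem.List.foldl_pyRange_zero_pyGetD']

-- ===== VERDICT (by name: the statement is the Claim_ definition above) =====
theorem is_inside_html_body_spec : Claim_equal_is_inside_html_body := by
  intro lines line_idx _hdom hpre
  unfold Pre_is_inside_html_body at hpre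
  unfold Spec_is_inside_html_body
  show (((PySem.List.pyRange 0 line_idx 1).foldl
      (fun st i => tripleStep st (PySem.List.pyGetD lines i "")) (false, false, false)).1
    && !((PySem.List.pyRange 0 line_idx 1).foldl
      (fun st i => tripleStep st (PySem.List.pyGetD lines i "")) (false, false, false)).2.1
    && !((PySem.List.pyRange 0 line_idx 1).foldl
      (fun st i => tripleStep st (PySem.List.pyGetD lines i "")) (false, false, false)).2.2)
    = is_inside_html_body_alt lines line_idx
  by_cases h0 : 0 ≤ line_idx
  · rw [pyRange_fold_eq_take lines line_idx h0 hpre tripleStep (false, false, false),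
      triple_fold_split]
    have hn : line_idx.toNat ≤ lines.length := by omega
    show _ = (let n := line_idx.toNat; lastState lines "<body" "</body>" n
      && !(lastState lines "<style" "</style>" n) && !(lastState lines "<script" "</script>" n))
    simp only [foldl_stepC_eq_back, lastState_eq_back lines _ _ _ hn]
  · rw [PySem.List.pyRange_one_eq_nil (by omega)]
    have h : line_idx.toNat = 0 := by omega
    show _ = (let n := line_idx.toNat; lastState lines "<body" "</body>" n
      && !(lastState lines "<style" "</style>" n) && !(lastState lines "<script" "</script>" n))
    simp [h, lastState]
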